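-- pv_equiv track=rewrite | github.com/Hugo089/Python | Funciones/Ejercicio5.py | calcularMaxMin
-- ===== SOURCE A (Python) =====
-- def calcularMaxMin(vector):
--     min = vector[0]
--     max = vector[0]
--     vminmax=[]
--     for i in vector:
--         if min>i:
--             min = i
--         if max<i:
--             max = i
--     vminmax.append(min)
--     vminmax.append(max)
--     return vminmax
-- ===== SOURCE B (Python) =====
-- def calcularMaxMin(vector):
--     s = sorted(vector)
--     return [s[0], s[-1]]
-- ===== Notes on version B (the rewrite author's own statement) =====
-- stated objective: simpler
-- what changed: Replaces the explicit min/max tracking loop with a sort-then-index strategy: sort once and take the first and last elements.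
import Mathlib
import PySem

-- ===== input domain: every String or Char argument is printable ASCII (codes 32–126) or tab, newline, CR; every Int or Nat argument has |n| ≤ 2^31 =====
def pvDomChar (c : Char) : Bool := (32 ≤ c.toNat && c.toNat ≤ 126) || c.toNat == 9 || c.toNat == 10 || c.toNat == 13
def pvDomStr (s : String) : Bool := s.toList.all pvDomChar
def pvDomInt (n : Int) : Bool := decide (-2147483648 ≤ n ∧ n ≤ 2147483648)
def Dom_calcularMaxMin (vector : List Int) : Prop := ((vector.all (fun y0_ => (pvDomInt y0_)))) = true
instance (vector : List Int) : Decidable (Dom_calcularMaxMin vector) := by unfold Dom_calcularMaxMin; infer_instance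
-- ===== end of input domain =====

-- B replaces A's explicit min/max tracking loop with sort-then-index (simpler decomposition, not faster).


-- ===== PORT A =====
-- min = vector[0]; max = vector[0]; then one pass updating both; return [min, max]
def calcularMaxMin (vector : List Int) : List Int :=
  match PySem.List.pyGet? vector 0 with
  | none => []   -- IndexError on empty input: excluded by Pre_
  | some h =>
    let p := vector.foldl
      (fun (s : Int × Int) i =>
        (if s.1 > i then i else s.1, if s.2 < i then i else s.2)) (h, h)
    [p.1, p.2]

-- ===== PORT B =====
-- s = sorted(vector); return [s[0], s[-1]]
def calcularMaxMin_alt (vector : List Int) : List Int :=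
  let s := PySem.List.sorted vector (fun x => x) false
  match PySem.List.pyGet? s 0, PySem.List.pyGet? s (-1) with
  | some a, some b => [a, b]
  | _, _ => []   -- IndexError on empty input: excluded by Pre_

-- ===== PRECONDITION & SPEC =====
-- A raises IndexError on the empty list (vector[0]); Pre_ excludes exactly that input.
def Pre_calcularMaxMin (vector : List Int) : Prop := vector ≠ []
instance (vector : List Int) : Decidable (Pre_calcularMaxMin vector) := by
  unfold Pre_calcularMaxMin; infer_instance
def pvWitness_calcularMaxMin : List Int := ([3, 1, 2])

def Spec_calcularMaxMin (vector : List Int) (out : List Int) : Prop := out = calcularMaxMin_alt vector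
instance (vector : List Int) (out : List Int) : Decidable (Spec_calcularMaxMin vector out) := by unfold Spec_calcularMaxMin; infer_instance

-- ===== CLAIM (what is proved, stated in full; the proofs are below) =====
def Claim_equal_calcularMaxMin : Prop := ∀ (vector : List Int), Dom_calcularMaxMin vector → Pre_calcularMaxMin vector → Spec_calcularMaxMin vector (calcularMaxMin vector)

-- ===== LEMMAS AND PROOFS =====

-- The first component of A's fold only depends on the first accumulator component: it is foldl min.
theorem foldA_fst (l : List Int) : ∀ (a b : Int),
    (l.foldl (fun (s : Int × Int) i =>
      (if s.1 > i then i else s.1, if s.2 < i then i else s.2)) (a, b)).1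
    = l.foldl min a := by
  induction l with
  | nil => intro a b; rfl
  | cons x t ih =>
      intro a b
      simp only [List.foldl_cons, ih]
      congr 1
      by_cases h : a > x <;> simp [h, min_def]

theorem foldA_snd (l : List Int) : ∀ (a b : Int),
    (l.foldl (fun (s : Int × Int) i =>
      (if s.1 > i then i else s.1, if s.2 < i then i else s.2)) (a, b)).2
    = l.foldl max b := by
  induction l with
  | nil => intro a b; rfl
  | cons x t ih =>
      intro a b
      simp only [List.foldl_cons, ih]
      congr 1
      by_cases h : b < x <;> simp [h, max_def] <;> omega

theorem foldl_min_mem (l : List Int) : ∀ a : Int, l.foldl min a ∈ a :: l := by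
  induction l with
  | nil => intro a; simp
  | cons x t ih =>
      intro a
      simp only [List.foldl_cons]
      rcases List.mem_cons.1 (ih (min a x)) with h | h
      · rcases min_choice a x with hm | hm <;> rw [hm] at h ⊢ <;> simp [h]
      · simp [List.mem_cons, h]

theorem foldl_min_le (l : List Int) : ∀ (a : Int) (y : Int), y ∈ a :: l → l.foldl min a ≤ y := by
  induction l with
  | nil => intro a y hy; simp at hy; simp [hy]
  | cons x t ih =>
      intro a y hy
      simp only [List.foldl_cons]
      rcases List.mem_cons.1 hy with heq | hy'
      · subst heq; exact le_trans (ih _ _ (List.mem_cons_self)) (min_le_left _ _)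
      · rcases List.mem_cons.1 hy' with heq | hy''
        · subst heq; exact le_trans (ih _ _ (List.mem_cons_self)) (min_le_right _ _)
        · exact ih _ _ (List.mem_cons_of_mem _ hy'')

theorem foldl_max_mem (l : List Int) : ∀ a : Int, l.foldl max a ∈ a :: l := by
  induction l with
  | nil => intro a; simp
  | cons x t ih =>
      intro a
      simp only [List.foldl_cons]
      rcases List.mem_cons.1 (ih (max a x)) with h | h
      · rcases max_choice a x with hm | hm <;> rw [hm] at h ⊢ <;> simp [h]
      · simp [List.mem_cons, h]

theorem foldl_max_ge (l : List Int) : ∀ (a : Int) (y : Int), y ∈ a :: l → y ≤ l.foldl max a := by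
  induction l with
  | nil => intro a y hy; simp at hy; simp [hy]
  | cons x t ih =>
      intro a y hy
      simp only [List.foldl_cons]
      rcases List.mem_cons.1 hy with heq | hy'
      · subst heq; exact le_trans (le_max_left _ _) (ih _ _ (List.mem_cons_self))
      · rcases List.mem_cons.1 hy' with heq | hy''
        · subst heq; exact le_trans (le_max_right _ _) (ih _ _ (List.mem_cons_self))
        · exact ih _ _ (List.mem_cons_of_mem _ hy'')

-- the last element of the sorted list bounds every element from above
theorem sorted_getLast_ge (xs : List Int) (hne : xs ≠ []) (y : Int) (hy : y ∈ xs) :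
    y ≤ (PySem.List.sorted xs (fun x => x) false).getLast
      (by simpa [PySem.List.sorted_eq_nil_iff] using hne) := by
  set s := PySem.List.sorted xs (fun x => x) false with hs
  have hsne : s ≠ [] := by simpa [hs, PySem.List.sorted_eq_nil_iff] using hne
  have hys : y ∈ s := by rw [hs, PySem.List.mem_sorted]; exact hy
  obtain ⟨p, hp, hyp⟩ := List.mem_iff_getElem.1 hys
  have hlast : s.getLast hsne = s[s.length - 1]'(by
      have := List.length_pos_iff.2 hsne; omega) := List.getLast_eq_getElem hsne
  rw [hlast, ← hyp]
  have := PySem.List.key_sorted_getElem_mono (xs := xs) (key := fun x => x)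
    (p := p) (q := s.length - 1) (by omega) (by simp only [← hs]; omega)
  simpa [← hs] using this

theorem main_eq (vector : List Int) (hne : vector ≠ []) :
    calcularMaxMin vector = calcularMaxMin_alt vector := by
  obtain ⟨h, t, rfl⟩ := List.exists_cons_of_ne_nil hne
  set l := h :: t with hl
  -- A's side
  have hget0 : PySem.List.pyGet? l 0 = some h := by simp [hl]
  -- B's side: sorted list is nonempty
  set s := PySem.List.sorted l (fun x => x) false with hs
  have hsne : s ≠ [] := by simp [hs, PySem.List.sorted_eq_nil_iff, hl]
  obtain ⟨m, st, hcons⟩ := List.exists_cons_of_ne_nil hsne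
  have hb0 : PySem.List.pyGet? s 0 = some m := by rw [hcons]; simp
  have hbl : PySem.List.pyGet? s (-1) = some (s.getLast hsne) := by
    rw [PySem.List.pyGet?_neg_one, List.getLast?_eq_some_getLast hsne]
  -- unfold both
  unfold calcularMaxMin calcularMaxMin_alt
  rw [hget0]
  simp only [← hs, hb0, hbl]
  -- reduce A's fold to foldl min / foldl max
  rw [show (l.foldl (fun (s : Int × Int) i =>
        (if s.1 > i then i else s.1, if s.2 < i then i else s.2)) (h, h))
      = ((l.foldl (fun (s : Int × Int) i =>
        (if s.1 > i then i else s.1, if s.2 < i then i else s.2)) (h, h)).1,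
         (l.foldl (fun (s : Int × Int) i =>
        (if s.1 > i then i else s.1, if s.2 < i then i else s.2)) (h, h)).2) from rfl]
  rw [foldA_fst, foldA_snd]
  congr 1
  -- min part: foldl min h l = m
  · have hmem : l.foldl min h ∈ l := by
      rcases List.mem_cons.1 (foldl_min_mem l h) with h1 | h1
      · rw [h1, hl]; exact List.mem_cons_self
      · exact h1
    have hle : ∀ y ∈ l, l.foldl min h ≤ y := by
      intro y hy
      exact foldl_min_le l h y (List.mem_cons_of_mem _ hy)
    have hmle : ∀ y ∈ l, m ≤ y := by
      have := PySem.List.key_head_sorted_le (xs := l) (key := fun x => x) (m := m) (t := st)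
        (by rw [← hs, hcons])
      simpa using this
    have hmmem : m ∈ l := by
      have hmS : m ∈ s := by rw [hcons]; exact List.mem_cons_self
      exact (PySem.List.mem_sorted _ _ _ _).mp hmS
    exact le_antisymm (hle m hmmem) (hmle _ hmem)
  -- max part
  · congr 1
    have hmem : l.foldl max h ∈ l := by
      have hh := foldl_max_mem l h
      rcases List.mem_cons.1 hh with h1 | h1
      · rw [h1, hl]; exact List.mem_cons_self
      · exact h1
    have hge : ∀ y ∈ l, y ≤ l.foldl max h := by
      intro y hy
      exact foldl_max_ge l h y (List.mem_cons_of_mem _ hy)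
    have hlast_mem : s.getLast hsne ∈ l := by
      have hgm : s.getLast hsne ∈ s := List.getLast_mem hsne
      exact (PySem.List.mem_sorted _ _ _ _).mp hgm
    have hlast_ge : ∀ y ∈ l, y ≤ s.getLast hsne := by
      intro y hy
      have := sorted_getLast_ge l (by simp [hl]) y hy
      simpa [← hs] using this
    exact le_antisymm (hlast_ge _ hmem) (hge _ hlast_mem)

-- ===== VERDICT (by name: the statement is the Claim_ definition above) =====
theorem calcularMaxMin_spec : Claim_equal_calcularMaxMin := by
  intro vector _ hpre
  unfold Spec_calcularMaxMin
  exact main_eq vector hpre
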